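-- pv_equiv track=rewrite | github.com/RobbieTmbs/Sokoban-DIDPpy | new2.py | pad_puzzle_to_square
-- ===== SOURCE A (Python) =====
-- def pad_puzzle_to_square(puzzle, pad_value=0):
--     height = len(puzzle)
--     width = max(len(row) for row in puzzle)
--     size = max(width, height)
--
--     # Pad out rows
--     padded = [row + [pad_value] * (size - len(row)) for row in puzzle]
--
--     # Add additional rows
--     while len(padded) < size:
--         padded.append([pad_value] * size)
--
--     return padded
-- ===== SOURCE B (Python) =====
-- def pad_puzzle_to_square(puzzle, pad_value=0):
--     width = max(len(row) for row in puzzle)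
--     size = max(width, len(puzzle))
--     return [[puzzle[i][j] if i < len(puzzle) and j < len(puzzle[i]) else pad_value
--              for j in range(size)]
--             for i in range(size)]
-- ===== Notes on version B (the rewrite author's own statement) =====
-- stated objective: alternative
-- what changed: A pads each existing row with a suffix and then appends missing rows in a while loop; B builds the whole size x size square in one closed-form per-cell comprehension (cell (i,j) is puzzle[i][j] if it exists, else pad_value).
import Mathlib
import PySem

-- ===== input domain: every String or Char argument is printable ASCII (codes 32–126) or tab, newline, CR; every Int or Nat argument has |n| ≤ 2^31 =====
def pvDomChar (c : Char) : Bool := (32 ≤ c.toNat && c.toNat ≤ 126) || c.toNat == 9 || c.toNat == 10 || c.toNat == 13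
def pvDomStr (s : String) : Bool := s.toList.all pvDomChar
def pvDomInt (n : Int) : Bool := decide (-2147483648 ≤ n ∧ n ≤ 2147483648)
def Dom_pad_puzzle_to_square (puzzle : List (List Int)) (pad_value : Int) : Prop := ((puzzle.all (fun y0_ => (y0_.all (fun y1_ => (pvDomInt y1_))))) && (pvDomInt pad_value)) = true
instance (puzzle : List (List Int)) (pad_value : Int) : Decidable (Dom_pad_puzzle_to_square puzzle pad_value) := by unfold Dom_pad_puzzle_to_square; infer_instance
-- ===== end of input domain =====

-- B replaces A's pad-rows-then-append-rows construction by a single closed-form per-cell comprehension (alternative decomposition, same cost).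


-- ===== PORT A =====
-- the 'while len(padded) < size: padded.append([pad_value] * size)' loop
def pvAddRows (size pad_value : Int) (padded : List (List Int)) : List (List Int) :=
  if h : (padded.length : Int) < size then
    pvAddRows size pad_value (padded ++ [PySem.List.pyRepeat [pad_value] size])
  else padded
termination_by (size - padded.length).toNat
decreasing_by simp; omega

def pad_puzzle_to_square (puzzle : List (List Int)) (pad_value : Int) : List (List Int) :=
  let height : Int := puzzle.length
  match PySem.List.max? (puzzle.map (fun row => (row.length : Int))) (fun y => y) with
  | none => []   -- Python raises ValueError here (max of empty); excluded by Pre_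
  | some width =>
    let size := max width height
    let padded := puzzle.map (fun row => row ++ PySem.List.pyRepeat [pad_value] (size - (row.length : Int)))
    pvAddRows size pad_value padded

-- ===== PORT B =====
def pad_puzzle_to_square_alt (puzzle : List (List Int)) (pad_value : Int) : List (List Int) :=
  match PySem.List.max? (puzzle.map (fun row => (row.length : Int))) (fun y => y) with
  | none => []   -- Python raises ValueError here (max of empty); excluded by Pre_
  | some width =>
    let size := max width (puzzle.length : Int)
    (PySem.List.pyRange 0 size 1).map (fun i =>
      (PySem.List.pyRange 0 size 1).map (fun j =>
        if i < (puzzle.length : Int) ∧ j < ((PySem.List.pyGetD puzzle i []).length : Int)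
        then PySem.List.pyGetD (PySem.List.pyGetD puzzle i []) j pad_value
        else pad_value))

-- ===== PRECONDITION & SPEC =====
-- Pre_ excludes only the empty puzzle, on which Python A (and B) raise ValueError from max().
def Pre_pad_puzzle_to_square (puzzle : List (List Int)) (pad_value : Int) : Prop := puzzle ≠ []
instance (puzzle : List (List Int)) (pad_value : Int) : Decidable (Pre_pad_puzzle_to_square puzzle pad_value) := by unfold Pre_pad_puzzle_to_square; infer_instance
def pvWitness_pad_puzzle_to_square : List (List Int) × Int := ([[1, 2], [3]], 0)

def Spec_pad_puzzle_to_square (puzzle : List (List Int)) (pad_value : Int) (out : List (List Int)) : Prop := out = pad_puzzle_to_square_alt puzzle pad_value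
instance (puzzle : List (List Int)) (pad_value : Int) (out : List (List Int)) : Decidable (Spec_pad_puzzle_to_square puzzle pad_value out) := by unfold Spec_pad_puzzle_to_square; infer_instance

-- ===== CLAIM (what is proved, stated in full; the proofs are below) =====
def Claim_equal_pad_puzzle_to_square : Prop := ∀ (puzzle : List (List Int)) (pad_value : Int), Dom_pad_puzzle_to_square puzzle pad_value → Pre_pad_puzzle_to_square puzzle pad_value → Spec_pad_puzzle_to_square puzzle pad_value (pad_puzzle_to_square puzzle pad_value)

-- ===== LEMMAS AND PROOFS =====

-- the while loop appends exactly (size - len).toNat copies of the pad row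
lemma pvAddRows_eq (size pad : Int) (padded : List (List Int)) :
    pvAddRows size pad padded =
      padded ++ List.replicate (size - (padded.length : Int)).toNat (PySem.List.pyRepeat [pad] size) := by
  generalize hn : (size - (padded.length : Int)).toNat = n
  induction n generalizing padded with
  | zero =>
      rw [pvAddRows, dif_neg (by omega)]
      simp
  | succ n ih =>
      have hlt : (padded.length : Int) < size := by omega
      rw [pvAddRows, dif_pos hlt, ih _ (by simp; omega)]
      simp [List.replicate_succ, List.append_assoc]

-- one padded row, as a per-cell comprehension
lemma pvRow_eq (size : Int) (pad : Int) (row : List Int) (hle : (row.length : Int) ≤ size) :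
    (PySem.List.pyRange 0 size 1).map
        (fun j => if j < (row.length : Int) then PySem.List.pyGetD row j pad else pad)
      = row ++ List.replicate (size - (row.length : Int)).toNat pad := by
  rw [PySem.List.pyRange_one]
  apply List.ext_getElem
  · simp; omega
  · intro k h1 h2
    simp only [List.getElem_map, List.getElem_range]
    have hk : k < size.toNat := by simpa using h1
    by_cases hkr : k < row.length
    · rw [if_pos (by exact_mod_cast (by omega : ((0:Int) + k) < row.length))]
      have : PySem.List.pyGetD row ((0 : Int) + k) pad = row[k] := by
        rw [show ((0:Int) + k) = (k : Int) by ring, PySem.List.pyGetD_natCast]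
        simp [List.getD, hkr]
      rw [this, List.getElem_append_left hkr]
    · rw [if_neg (by omega)]
      rw [List.getElem_append_right (by omega)]
      simp

theorem pad_puzzle_to_square_spec : Claim_equal_pad_puzzle_to_square := by
  intro puzzle pad_value _hdom hpre
  unfold Spec_pad_puzzle_to_square pad_puzzle_to_square pad_puzzle_to_square_alt
  cases hmax : PySem.List.max? (puzzle.map (fun row => (row.length : Int))) (fun y => y) with
  | none => rfl
  | some width =>
    simp only []
    set h : Int := (puzzle.length : Int) with hh
    set size : Int := max width h with hsize
    have hwidth_mem : width ∈ puzzle.map (fun row => (row.length : Int)) :=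
      PySem.List.max?_mem hmax
    have hwidth_nonneg : 0 ≤ width := by
      rcases List.mem_map.mp hwidth_mem with ⟨r, _, hr⟩; omega
    have hrow_le : ∀ row ∈ puzzle, (row.length : Int) ≤ size := by
      intro row hrow
      have := PySem.List.max?_isMax hmax ((row.length : Int))
        (List.mem_map_of_mem hrow)
      simp only at this
      omega
    have hh_le : h ≤ size := le_max_right _ _
    have hh_nonneg : (0:Int) ≤ h := by positivity
    rw [pvAddRows_eq]
    apply List.ext_getElem
    · simp [PySem.List.length_pyRange_one]
      omega
    · intro i hA hB
      have hisz : i < size.toNat := by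
        simpa [PySem.List.length_pyRange_one] using hB
      rw [List.getElem_map, PySem.List.getElem_pyRange_one]
      have hzero : ((0:Int) + (i:Int)) = (i : Int) := by ring
      by_cases hih : i < puzzle.length
      · -- a real row of the puzzle
        rw [List.getElem_append_left (by simpa using hih)]
        simp only [List.getElem_map]
        have hget : PySem.List.pyGetD puzzle ((0:Int) + (i:Int)) ([] : List Int) = puzzle[i] := by
          rw [hzero, PySem.List.pyGetD_natCast]; simp [List.getD, hih]
        have hle : ((puzzle[i]).length : Int) ≤ size := hrow_le _ (List.getElem_mem hih)
        calc (puzzle[i] ++ PySem.List.pyRepeat [pad_value] (size - ((puzzle[i]).length : Int)))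
            = puzzle[i] ++ List.replicate (size - ((puzzle[i]).length : Int)).toNat pad_value := by
              rw [PySem.List.pyRepeat_singleton]
          _ = (PySem.List.pyRange 0 size 1).map
                (fun j => if j < ((puzzle[i]).length : Int) then PySem.List.pyGetD puzzle[i] j pad_value else pad_value) := (pvRow_eq size pad_value _ hle).symm
          _ = (PySem.List.pyRange 0 size 1).map
                (fun j => if (0:Int) + (i:Int) < h ∧ j < ((PySem.List.pyGetD puzzle ((0:Int)+(i:Int)) []).length : Int)
                  then PySem.List.pyGetD (PySem.List.pyGetD puzzle ((0:Int)+(i:Int)) []) j pad_value else pad_value) := by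
              apply List.map_congr_left
              intro j _
              rw [hget, hzero]
              have : ((i:Int) < h) = True := by simp [hh]; exact_mod_cast hih
              simp [this]
      · -- an appended all-pad row
        rw [List.getElem_append_right (by simpa using hih)]
        simp only [List.getElem_replicate]
        have hguard : ∀ j : Int, ¬ ((0:Int) + (i:Int) < h ∧ j < ((PySem.List.pyGetD puzzle ((0:Int)+(i:Int)) []).length : Int)) := by
          intro j hc
          have : (i : Int) < h := by omega
          rw [hh] at this
          exact hih (by exact_mod_cast this)
        calc PySem.List.pyRepeat [pad_value] size
            = List.replicate size.toNat pad_value := PySem.List.pyRepeat_singleton _ _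
          _ = (PySem.List.pyRange 0 size 1).map (fun _ => pad_value) := by
              rw [List.map_const', PySem.List.length_pyRange_one]
              norm_num
          _ = (PySem.List.pyRange 0 size 1).map
                (fun j => if (0:Int) + (i:Int) < h ∧ j < ((PySem.List.pyGetD puzzle ((0:Int)+(i:Int)) []).length : Int)
                  then PySem.List.pyGetD (PySem.List.pyGetD puzzle ((0:Int)+(i:Int)) []) j pad_value else pad_value) := by
              apply List.map_congr_left
              intro j _
              rw [if_neg (hguard j)]
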